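-- pv_equiv track=rewrite | github.com/orozDev/b5_exam | Aziz/2.py | shifr_text
-- ===== SOURCE A (Python) =====
-- def shifr_text(text):
--     counts = {}
--     for char in text:
--         if char in counts:
--             counts[char] += 1
--         else:
--             counts[char] = 1
--
--
--     result = []
--
--
--     for char in text:
--         if char.islower():
--             if counts[char] > 1:
--                 result.append('(')
--             else:
--                 result.append(')')
--         elif char.isupper():
--             if counts[char] > 1:
--                 result.append('[')
--             else:
--                 result.append(']')
--
--     return ''.join(result)
-- ===== SOURCE B (Python) =====
-- def shifr_text(text):
--     s = sorted(text)
--     dup = {a for a, b in zip(s, s[1:]) if a == b}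
--     out = []
--     for c in text:
--         if c.islower():
--             out.append('(' if c in dup else ')')
--         elif c.isupper():
--             out.append('[' if c in dup else ']')
--     return ''.join(out)
-- ===== Notes on version B (the rewrite author's own statement) =====
-- stated objective: alternative
-- what changed: Replaces the frequency-dict counting pass by a sort-then-scan algorithm: duplicated characters are identified as equal adjacent pairs of sorted(text) collected into a set, and one pass then picks each bracket by set membership instead of a count comparison.
import Mathlib
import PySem

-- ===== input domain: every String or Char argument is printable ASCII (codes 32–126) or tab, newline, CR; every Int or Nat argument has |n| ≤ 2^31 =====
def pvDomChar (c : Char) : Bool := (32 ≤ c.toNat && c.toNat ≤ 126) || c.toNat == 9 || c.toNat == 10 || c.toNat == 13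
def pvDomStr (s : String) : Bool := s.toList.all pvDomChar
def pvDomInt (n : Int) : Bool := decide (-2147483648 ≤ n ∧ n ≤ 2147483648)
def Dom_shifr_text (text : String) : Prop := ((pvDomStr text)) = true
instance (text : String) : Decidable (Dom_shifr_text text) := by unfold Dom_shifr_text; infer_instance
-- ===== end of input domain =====

-- B replaces the frequency-dict pass by sort-then-scan: duplicated characters are found as equal
-- adjacent pairs of sorted(text) collected into a set, then one pass maps each cased char to its
-- bracket by set membership (objective: alternative algorithm, same purpose).


-- ===== PORT A =====
-- A's first loop: build the frequency dict (if char in counts: counts[char] += 1 else: counts[char] = 1)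
def shifrCounts (l : List Char) : PySem.Dict Char Int :=
  l.foldl (fun d c => if d.contains c then d.modify c 0 (· + 1) else d.insert c 1)
    PySem.Dict.empty

-- A's second loop: append a bracket to result for each cased character
def shifrResult (counts : PySem.Dict Char Int) (l : List Char) : List String :=
  l.foldl
    (fun r c =>
      if PySem.Chars.islower c then
        (if counts.getD c 0 > 1 then r ++ ["("] else r ++ [")"])
      else if PySem.Chars.isupper c then
        (if counts.getD c 0 > 1 then r ++ ["["] else r ++ ["]"])
      else r)
    []

def shifr_text (text : String) : String :=
  PySem.Str.join "" (shifrResult (shifrCounts text.toList) text.toList)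

-- ===== PORT B =====
-- dup = {a for a, b in zip(s, s[1:]) if a == b}
def shifrDup (s : List Char) : PySem.Set Char :=
  PySem.Set.ofList (((s.zip (PySem.List.slice s (some 1) none)).filter
    (fun p => p.1 == p.2)).map Prod.fst)

def shifr_text_alt (text : String) : String :=
  let s := PySem.List.sorted text.toList (fun c => c) false
  let dup := shifrDup s
  PySem.Str.join ""
    (text.toList.foldl
      (fun out c =>
        if PySem.Chars.islower c then
          out ++ [if PySem.Set.contains dup c then "(" else ")"]
        else if PySem.Chars.isupper c then
          out ++ [if PySem.Set.contains dup c then "[" else "]"]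
        else out)
      [])

-- ===== PRECONDITION & SPEC =====
def Spec_shifr_text (text : String) (out : String) : Prop := out = shifr_text_alt text
instance (text : String) (out : String) : Decidable (Spec_shifr_text text out) := by unfold Spec_shifr_text; infer_instance

-- ===== CLAIM (what is proved, stated in full; the proofs are below) =====
def Claim_equal_shifr_text : Prop := ∀ (text : String), Dom_shifr_text text → Spec_shifr_text text (shifr_text text)

-- ===== LEMMAS AND PROOFS =====

-- A's counting loop computes the multiplicity of every character.
theorem getD_shifrCounts_loop (l : List Char) (d : PySem.Dict Char Int) (v : Char) :
    (l.foldl (fun d c => if d.contains c then d.modify c 0 (· + 1) else d.insert c 1) d).getD v 0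
      = d.getD v 0 + l.count v := by
  induction l generalizing d with
  | nil => simp
  | cons c t ih =>
    rw [List.foldl_cons]
    by_cases h : d.contains c = true
    · rw [if_pos h, ih, PySem.Dict.getD_modify, List.count_cons]
      by_cases hvc : v = c
      · subst hvc; simp only [BEq.rfl, if_true]; push_cast; ring
      · simp only [if_neg hvc, beq_iff_eq, if_neg (Ne.symm hvc)]; push_cast; ring
    · have h' : d.contains c = false := by simpa using h
      rw [if_neg h, ih, PySem.Dict.getD_insert, List.count_cons]
      by_cases hvc : v = c
      · subst hvc
        rw [PySem.Dict.getD_of_not_contains d 0 h']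
        simp only [BEq.rfl, if_true]; push_cast; ring
      · simp only [if_neg hvc, beq_iff_eq, if_neg (Ne.symm hvc)]; push_cast; ring

theorem getD_shifrCounts (l : List Char) (v : Char) :
    (shifrCounts l).getD v 0 = (l.count v : Int) := by
  unfold shifrCounts
  rw [getD_shifrCounts_loop]
  simp

-- In a ≤-sorted list the duplicates sit next to each other: (c,c) is an adjacent
-- pair exactly when c occurs at least twice.
theorem adj_pair_iff_two_le_count (s : List Char) (hs : s.Pairwise (· ≤ ·)) (c : Char) :
    (c, c) ∈ s.zip s.tail ↔ 2 ≤ s.count c := by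
  induction s with
  | nil => simp
  | cons a t ih =>
    cases t with
    | nil =>
      simp only [List.tail_cons, List.zip_nil_right, List.not_mem_nil, false_iff, not_le]
      by_cases h : a = c <;> simp [h]
    | cons b u =>
      have hab : a ≤ b := (List.pairwise_cons.mp hs).1 b (by simp)
      have htp : (b :: u).Pairwise (· ≤ ·) := (List.pairwise_cons.mp hs).2
      have ihz := ih htp
      simp only [List.tail_cons, List.zip_cons_cons, List.mem_cons, Prod.mk.injEq] at ihz ⊢
      constructor
      · rintro (⟨hc1, hc2⟩ | hmem)
        · subst hc1; subst hc2
          simp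
        · have h2 := ihz.mp hmem
          by_cases h : a = c <;> simp [List.count_cons, h] at h2 ⊢ <;> omega
      · intro h2
        by_cases hac : a = c
        · subst hac
          have hc1 : 1 ≤ (b :: u).count a := by
            simp [List.count_cons] at h2 ⊢; omega
          have hmem : a ∈ b :: u := List.count_pos_iff.mp (by omega)
          have hba : b ≤ a := by
            rcases List.mem_cons.mp hmem with h | h
            · exact le_of_eq h.symm
            · exact (List.pairwise_cons.mp htp).1 a h
          exact Or.inl ⟨rfl, le_antisymm hab hba⟩
        · right
          apply ihz.mpr
          simp [List.count_cons, hac] at h2 ⊢; omega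

-- Membership in B's dup set is "count > 1" of the original characters.
theorem mem_shifrDup (l : List Char) (c : Char) :
    c ∈ shifrDup (PySem.List.sorted l (fun c => c) false) ↔ 2 ≤ l.count c := by
  set s := PySem.List.sorted l (fun c => c) false with hsdef
  have hpw : s.Pairwise (· ≤ ·) := by
    simpa using PySem.List.sorted_pairwise l (fun c => c)
  have hperm : s.Perm l := PySem.List.sorted_perm l (fun c => c) false
  unfold shifrDup
  rw [PySem.List.slice_from_one, PySem.Set.mem_ofList]
  simp only [List.mem_map, List.mem_filter]
  rw [← hperm.count_eq, ← adj_pair_iff_two_le_count s hpw c]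
  constructor
  · rintro ⟨⟨x, y⟩, ⟨hmem, heq⟩, hfst⟩
    simp only [beq_iff_eq] at heq
    simp only at hfst
    subst hfst; subst heq
    exact hmem
  · intro h
    exact ⟨(c, c), ⟨h, by simp⟩, rfl⟩

theorem shifr_text_eq_alt (text : String) : shifr_text text = shifr_text_alt text := by
  unfold shifr_text shifr_text_alt shifrResult
  congr 1
  apply PySem.List.foldl_congr_mem
  intro r c _
  have hA : (shifrCounts text.toList).getD c 0 > 1 ↔ 2 ≤ text.toList.count c := by
    rw [getD_shifrCounts]; exact_mod_cast Iff.rfl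
  have hB := mem_shifrDup text.toList c
  by_cases h2 : 2 ≤ text.toList.count c
  · have ha : (shifrCounts text.toList).getD c 0 > 1 := hA.mpr h2
    have hb : c ∈ shifrDup (PySem.List.sorted text.toList (fun c => c) false) := hB.mpr h2
    simp [ha, hb]
  · have ha : ¬ (shifrCounts text.toList).getD c 0 > 1 := fun h => h2 (hA.mp h)
    have hb : c ∉ shifrDup (PySem.List.sorted text.toList (fun c => c) false) := fun h => h2 (hB.mp h)
    simp [ha, hb]

-- ===== VERDICT (by name: the statement is the Claim_ definition above) =====
theorem shifr_text_spec : Claim_equal_shifr_text := by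
  intro text _
  exact shifr_text_eq_alt text
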